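-- pv_equiv track=rewrite | github.com/max-elia/cspp | src/clustering/build_clusters_angular_slices.py | _partition_equal_size
-- ===== SOURCE A (Python) =====
-- def _partition_equal_size(
--     ordered_ids: list[int],
--     n_clusters: int,
-- ) -> list[list[int]]:
--     n = len(ordered_ids)
--     if n == 0:
--         return []
--     if n_clusters <= 0:
--         return [ordered_ids]
--
--     base = n // n_clusters
--     rem = n % n_clusters
--     groups: list[list[int]] = []
--     start = 0
--     for cluster_index in range(n_clusters):
--         size = base + (1 if cluster_index < rem else 0)
--         end = start + size
--         if end > start:
--             groups.append(ordered_ids[start:end])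
--         start = end
--     return groups
-- ===== SOURCE B (Python) =====
-- def _partition_equal_size(
--     ordered_ids: list[int],
--     n_clusters: int,
-- ) -> list[list[int]]:
--     if not ordered_ids:
--         return []
--     if n_clusters <= 0:
--         return [ordered_ids]
--     # greedy: repeatedly take a ceil(remaining_items / remaining_clusters) chunk
--     groups: list[list[int]] = []
--     n = len(ordered_ids)
--     start = 0
--     remaining = n_clusters
--     while start < n:
--         size = -((start - n) // remaining)
--         groups.append(ordered_ids[start:start + size])
--         start += size
--         remaining -= 1
--     return groups
-- ===== Notes on version B (the rewrite author's own statement) =====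
-- stated objective: alternative
-- what changed: B replaces A's precomputed base/remainder size table (for-loop over range(n_clusters) with a skip-empty-slice test) by a greedy scheme with no base/rem and no empty-slice filtering: while items remain, peel off one ceil(items_left / clusters_left)-sized chunk and decrement the cluster count.
import Mathlib
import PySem

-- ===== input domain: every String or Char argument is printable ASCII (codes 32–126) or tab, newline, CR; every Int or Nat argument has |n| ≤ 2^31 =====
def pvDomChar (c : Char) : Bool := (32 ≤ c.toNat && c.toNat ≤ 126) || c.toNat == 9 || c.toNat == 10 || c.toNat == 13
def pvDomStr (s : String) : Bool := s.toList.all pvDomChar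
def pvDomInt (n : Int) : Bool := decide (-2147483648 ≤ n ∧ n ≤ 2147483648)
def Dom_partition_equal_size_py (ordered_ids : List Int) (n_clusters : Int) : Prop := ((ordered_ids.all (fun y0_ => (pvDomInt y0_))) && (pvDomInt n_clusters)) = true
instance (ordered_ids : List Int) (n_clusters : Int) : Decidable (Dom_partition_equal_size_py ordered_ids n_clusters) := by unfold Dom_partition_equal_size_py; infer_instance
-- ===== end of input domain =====

-- B partitions greedily: while items remain, peel one ceil(items_left/clusters_left)-sized chunk,
-- instead of A's precomputed base/remainder sizes with a skip-empty test; objective: alternative (same cost).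

-- ===== PORT A =====
def partition_equal_size_py (ordered_ids : List Int) (n_clusters : Int) : List (List Int) :=
  let n : Int := ordered_ids.length
  if n = 0 then []
  else if n_clusters ≤ 0 then [ordered_ids]
  else
    let base := PySem.Int.floordiv n n_clusters
    let rem := PySem.Int.mod n n_clusters
    -- for cluster_index in range(n_clusters): state = (groups, start)
    let res := (PySem.List.pyRange 0 n_clusters 1).foldl
      (fun (st : List (List Int) × Int) i =>
        (if st.2 + (base + (if i < rem then 1 else 0)) > st.2 then
           st.1 ++ [PySem.List.slice ordered_ids (some st.2) (some (st.2 + (base + (if i < rem then 1 else 0))))]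
         else st.1,
         st.2 + (base + (if i < rem then 1 else 0))))
      ([], 0)
    res.1

-- ===== PORT B =====
-- B's while loop, with a fuel guard that only makes the recursion total: the loop body is
-- entered at most (len - start) times on the inputs it is called with, and `fuel` bounds that.
def pvAltLoop (ordered_ids : List Int) (fuel : Nat) (groups : List (List Int))
    (start remaining : Int) : List (List Int) :=
  match fuel with
  | 0 => groups
  | Nat.succ fuel =>
    if start < (ordered_ids.length : Int) then
      -- size = -((start - n) // remaining)
      let size := -(PySem.Int.floordiv (start - (ordered_ids.length : Int)) remaining)
      pvAltLoop ordered_ids fuel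
        (groups ++ [PySem.List.slice ordered_ids (some start) (some (start + size))])
        (start + size) (remaining - 1)
    else groups

def partition_equal_size_py_alt (ordered_ids : List Int) (n_clusters : Int) : List (List Int) :=
  if ordered_ids = [] then []
  else if n_clusters ≤ 0 then [ordered_ids]
  else pvAltLoop ordered_ids (ordered_ids.length + 1) [] 0 n_clusters

-- ===== PRECONDITION & SPEC =====
def Spec_partition_equal_size_py (ordered_ids : List Int) (n_clusters : Int) (out : List (List Int)) : Prop := out = partition_equal_size_py_alt ordered_ids n_clusters
instance (ordered_ids : List Int) (n_clusters : Int) (out : List (List Int)) : Decidable (Spec_partition_equal_size_py ordered_ids n_clusters out) := by unfold Spec_partition_equal_size_py; infer_instance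

-- ===== CLAIM (what is proved, stated in full; the proofs are below) =====
def Claim_equal_partition_equal_size_py : Prop := ∀ (ordered_ids : List Int) (n_clusters : Int), Dom_partition_equal_size_py ordered_ids n_clusters → Spec_partition_equal_size_py ordered_ids n_clusters (partition_equal_size_py ordered_ids n_clusters)

-- ===== LEMMAS AND PROOFS =====

/-- Common reference shape: slice `ids` into the chunks named by the size list, skipping
nonpositive sizes. -/
def pvBySizes : List Int → List Int → List (List Int)
  | _, [] => []
  | ids, s :: ss =>
    if 0 < s then ids.take s.toNat :: pvBySizes (ids.drop s.toNat) ss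
    else pvBySizes ids ss

/-- A's size sequence: `base + 1` while `rem` is still positive, then `base`. -/
def pvSizes (base : Int) : Nat → Int → List Int
  | 0, _ => []
  | t + 1, rem => (base + if 0 < rem then 1 else 0) :: pvSizes base t (rem - 1)

theorem pvSizes_nonpos (base : Int) :
    ∀ (t : Nat) (r r' : Int), r ≤ 0 → r' ≤ 0 → pvSizes base t r = pvSizes base t r' := by
  intro t
  induction t with
  | zero => intro r r' _ _; rfl
  | succ t ih =>
    intro r r' hr hr'
    simp only [pvSizes, if_neg (by omega : ¬ (0:Int) < r), if_neg (by omega : ¬ (0:Int) < r')]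
    exact congrArg _ (ih _ _ (by omega) (by omega))

theorem pvBySizes_sizes_zero (ids : List Int) :
    ∀ (t : Nat) (r : Int), r ≤ 0 → pvBySizes ids (pvSizes 0 t r) = [] := by
  intro t
  induction t with
  | zero => intro r _; rfl
  | succ t ih =>
    intro r hr
    simp only [pvSizes, if_neg (by omega : ¬ (0:Int) < r), zero_add]
    simpa [pvBySizes] using ih (r - 1) (by omega)

/-- A's per-index size function, mapped over `range(a, a+t)`, is `pvSizes base t (rem - a)`. -/
theorem pvMap_pyRange_sizes (base rem : Int) :
    ∀ (t : Nat) (a : Int),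
      (PySem.List.pyRange a (a + (t : Int)) 1).map
          (fun i => base + if i < rem then 1 else 0)
        = pvSizes base t (rem - a) := by
  intro t
  induction t with
  | zero =>
    intro a
    simp [PySem.List.pyRange, pvSizes]
  | succ t ih =>
    intro a
    push_cast
    rw [PySem.List.pyRange_one_cons (by omega : a < a + ((t:Int) + 1))]
    have h1 : a + ((t : Int) + 1) = (a + 1) + (t : Int) := by ring
    rw [h1]
    simp only [List.map_cons, ih (a + 1), pvSizes]
    congr 1
    · congr 1
      by_cases h : a < rem
      · simp [h]
      · simp [h]
    · congr 1
      omega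

/-- A's running-start loop over a list of nonnegative sizes produces exactly `pvBySizes`. -/
theorem pvFoldA (ids : List Int) :
    ∀ (szs : List Int), (∀ x ∈ szs, 0 ≤ x) →
      ∀ (gs : List (List Int)) (s : Int), 0 ≤ s →
      (szs.foldl
        (fun (st : List (List Int) × Int) sz =>
          (if st.2 + sz > st.2 then
             st.1 ++ [PySem.List.slice ids (some st.2) (some (st.2 + sz))]
           else st.1,
           st.2 + sz)) (gs, s)).1
      = gs ++ pvBySizes (ids.drop s.toNat) szs := by
  intro szs
  induction szs with
  | nil => intro _ gs s _; simp [pvBySizes]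
  | cons sz rest ih =>
    intro hnn gs s hs
    have hsz : 0 ≤ sz := hnn sz (by simp)
    have hrest : ∀ x ∈ rest, 0 ≤ x := fun x hx => hnn x (by simp [hx])
    rw [List.foldl_cons]
    by_cases hpos : s + sz > s
    · simp only [if_pos hpos]
      rw [ih hrest _ _ (by omega)]
      rw [PySem.List.slice_toNat ids hs (by omega)]
      have h1 : (s + sz).toNat = s.toNat + sz.toNat := by omega
      simp only [pvBySizes, if_pos (show (0:Int) < sz by omega)]
      rw [h1, List.append_assoc,
        show s.toNat + sz.toNat - s.toNat = sz.toNat from by omega,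
        show List.drop (s.toNat + sz.toNat) ids
            = List.drop sz.toNat (List.drop s.toNat ids) from by
          rw [List.drop_drop]]
      simp
    · simp only [if_neg hpos]
      rw [ih hrest _ _ (by omega)]
      have hz : sz = 0 := by omega
      subst hz
      simp [pvBySizes]

theorem pvSizes_nonneg {base : Int} (hb : 0 ≤ base) :
    ∀ (t : Nat) (r : Int), ∀ x ∈ pvSizes base t r, 0 ≤ x := by
  intro t
  induction t with
  | zero => intro r x hx; simp [pvSizes] at hx
  | succ t ih =>
    intro r x hx
    simp only [pvSizes, List.mem_cons] at hx
    rcases hx with h | h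
    · split_ifs at h <;> omega
    · exact ih _ x h

/-- Python's `-(-n // K)` is ceiling division: `n // K` plus one when `n % K > 0`. -/
theorem pvCeil (n K : Int) (hK : 0 < K) :
    -(PySem.Int.floordiv (-n) K)
      = PySem.Int.floordiv n K + (if 0 < PySem.Int.mod n K then 1 else 0) := by
  have hmul := PySem.Int.floordiv_mul_add_mod n K
  have h0 := PySem.Int.mod_nonneg n hK
  have h1 := PySem.Int.mod_lt n hK
  rw [PySem.Int.neg_floordiv_neg_eq_iff_of_pos hK]
  split_ifs with h <;> constructor <;> nlinarith

/-- When the loop guard fails the loop returns its accumulator, whatever the fuel. -/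
theorem pvAltLoop_done (ids : List Int) (fuel : Nat) (gs : List (List Int)) (s r : Int)
    (h : ¬ s < (ids.length : Int)) : pvAltLoop ids fuel gs s r = gs := by
  cases fuel <;> simp [pvAltLoop, h]

set_option maxHeartbeats 1000000 in
/-- B's greedy ceil-chunk loop produces `pvBySizes` of A's size sequence for the rest. -/
theorem pvLoop_bySizes :
    ∀ (m : Nat), 0 < m → ∀ (fuel : Nat) (ids : List Int) (gs : List (List Int)) (s : Int),
      0 ≤ s → s ≤ (ids.length : Int) → ((ids.length : Int) - s).toNat ≤ fuel →
      pvAltLoop ids fuel gs s ((m : Nat) : Int)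
        = gs ++ pvBySizes (ids.drop s.toNat)
            (pvSizes (PySem.Int.floordiv ((ids.length : Int) - s) ((m : Nat) : Int)) m
              (PySem.Int.mod ((ids.length : Int) - s) ((m : Nat) : Int))) := by
  intro m
  induction m with
  | zero => intro h; omega
  | succ t ih =>
    intro _ fuel ids gs s hs0 hsn hfuel
    have hK : (0:Int) < ((t + 1 : Nat) : Int) := by push_cast; omega
    set n : Int := (ids.length : Int) with hn_def
    by_cases hlt : s < n
    · -- loop body runs
      set base := PySem.Int.floordiv (n - s) ((t + 1 : Nat) : Int) with hbase
      set rem := PySem.Int.mod (n - s) ((t + 1 : Nat) : Int) with hrem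
      have hmul := PySem.Int.floordiv_mul_add_mod (n - s) ((t + 1 : Nat) : Int)
      have hr0 := PySem.Int.mod_nonneg (n - s) hK
      have hr1 := PySem.Int.mod_lt (n - s) hK
      rw [← hrem] at hmul hr0 hr1
      rw [← hbase] at hmul
      have hb0 : 0 ≤ base := by
        by_contra hb
        push Not at hb
        nlinarith
      set size := base + (if 0 < rem then 1 else 0) with hsize
      have hceil : -(PySem.Int.floordiv (s - n) ((t + 1 : Nat) : Int)) = size := by
        have h := pvCeil (n - s) _ hK
        rw [← hbase, ← hrem, ← hsize] at h
        rw [show s - n = -(n - s) from by ring, h]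
      have hs1 : 1 ≤ size := by
        by_cases h : 0 < rem
        · simp only [hsize, if_pos h]; omega
        · have hr : rem = 0 := by omega
          simp only [hsize, if_neg h]
          by_contra hb
          push Not at hb
          nlinarith
      have hsn' : size ≤ n - s := by
        by_cases h : 0 < rem
        · simp only [hsize, if_pos h]; nlinarith
        · have hr : rem = 0 := by omega
          simp only [hsize, if_neg h]; nlinarith
      obtain ⟨f, rfl⟩ : ∃ f, fuel = f + 1 := by
        rcases fuel with _ | f
        · omega
        · exact ⟨f, rfl⟩
      simp only [pvAltLoop]
      rw [← hn_def, if_pos hlt, hceil]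
      rw [PySem.List.slice_toNat ids hs0 (by omega : (0:Int) ≤ s + size)]
      have h1 : (s + size).toNat = s.toNat + size.toNat := by omega
      have h2 : (s + size).toNat - s.toNat = size.toNat := by omega
      have hsizes : pvSizes base (t + 1) rem = size :: pvSizes base t (rem - 1) := by
        simp only [pvSizes, hsize]
      rw [hsizes]
      simp only [pvBySizes, if_pos (show (0:Int) < size by omega)]
      rw [h2,
        show List.take size.toNat (List.drop s.toNat ids)
              :: pvBySizes (List.drop size.toNat (List.drop s.toNat ids)) (pvSizes base t (rem - 1))
            = [List.take size.toNat (List.drop s.toNat ids)]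
              ++ pvBySizes (List.drop size.toNat (List.drop s.toNat ids)) (pvSizes base t (rem - 1))
          from rfl,
        ← List.append_assoc]
      have hdd : List.drop size.toNat (List.drop s.toNat ids)
          = List.drop (s + size).toNat ids := by
        rw [List.drop_drop, h1, Nat.add_comm]
      rw [hdd]
      rcases Nat.eq_zero_or_pos t with ht0 | htpos
      · -- last cluster: the chunk is everything that is left
        subst ht0
        have hrem0 : rem = 0 := by omega
        have hsz : size = n - s := by
          simp only [hsize, hrem0, if_neg (by omega : ¬ (0:Int) < (0:Int))]
          push_cast at hmul
          omega
        rw [pvAltLoop_done ids f _ (s + size) _ (by omega)]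
        simp [pvSizes, pvBySizes]
      · have hK1 : ((t + 1 : Nat) : Int) - 1 = ((t : Nat) : Int) := by push_cast; ring
        rw [hK1, ih htpos f ids _ (s + size) (by omega) (by omega) (by omega)]
        have htpos' : (0:Int) < ((t : Nat) : Int) := by omega
        have hKt : ((t + 1 : Nat) : Int) = ((t : Nat) : Int) + 1 := by push_cast; ring
        rw [hKt] at hmul hr1
        have hns : n - (s + size) = (n - s) - size := by ring
        rw [hns]
        by_cases h : 0 < rem
        · have hsz : size = base + 1 := by simp only [hsize, if_pos h]
          have hfd' : PySem.Int.floordiv ((n - s) - size) ((t : Nat) : Int) = base := by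
            rw [PySem.Int.floordiv_eq_iff_of_pos htpos']
            constructor <;> nlinarith
          have hmd' : PySem.Int.mod ((n - s) - size) ((t : Nat) : Int) = rem - 1 := by
            have := PySem.Int.floordiv_mul_add_mod ((n - s) - size) ((t : Nat) : Int)
            rw [hfd'] at this
            nlinarith
          rw [hfd', hmd']
        · have hrem0 : rem = 0 := by omega
          have hsz : size = base := by simp only [hsize, if_neg h]; ring
          rw [hsz]
          have hfd' : PySem.Int.floordiv ((n - s) - base) ((t : Nat) : Int) = base := by
            rw [PySem.Int.floordiv_eq_iff_of_pos htpos']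
            constructor <;> nlinarith
          have hmd' : PySem.Int.mod ((n - s) - base) ((t : Nat) : Int) = 0 := by
            have := PySem.Int.floordiv_mul_add_mod ((n - s) - base) ((t : Nat) : Int)
            rw [hfd'] at this
            nlinarith
          rw [hfd', hmd', pvSizes_nonpos base t 0 (rem - 1) le_rfl (by omega)]
    · -- loop never runs: nothing left, all remaining sizes are zero
      rw [pvAltLoop_done ids fuel gs s _ hlt]
      have hzero : n - s = 0 := by omega
      have hfd : PySem.Int.floordiv 0 ((t + 1 : Nat) : Int) = 0 := by
        rw [PySem.Int.floordiv_eq_iff_of_pos hK]; constructor <;> nlinarith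
      have hmd : PySem.Int.mod 0 ((t + 1 : Nat) : Int) = 0 := by
        have := PySem.Int.floordiv_mul_add_mod 0 ((t + 1 : Nat) : Int)
        rw [hfd] at this; linarith
      rw [hzero, hfd, hmd, pvBySizes_sizes_zero _ (t + 1) 0 le_rfl, List.append_nil]

-- ===== VERDICT (by name: the statement is the Claim_ definition above) =====
theorem partition_equal_size_py_spec : Claim_equal_partition_equal_size_py := by
  intro ids k _
  show partition_equal_size_py ids k = partition_equal_size_py_alt ids k
  by_cases h0 : ids = []
  · subst h0
    simp [partition_equal_size_py, partition_equal_size_py_alt]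
  · have hlen : ¬ ((ids.length : Int) = 0) := by
      have := List.length_pos_iff.mpr h0
      omega
    by_cases hk : k ≤ 0
    · simp only [partition_equal_size_py, partition_equal_size_py_alt,
        if_neg h0, if_pos hk, if_neg hlen]
    · -- k > 0
      have hkpos : 0 < k := by omega
      set m : Nat := k.toNat with hm
      have hkm : k = ((m : Nat) : Int) := by omega
      have hmpos : 0 < m := by omega
      set base := PySem.Int.floordiv (ids.length : Int) k with hbase
      set rem := PySem.Int.mod (ids.length : Int) k with hrem
      have hb0 : 0 ≤ base := by
        have hmul := PySem.Int.floordiv_mul_add_mod (ids.length : Int) k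
        have hr1 := PySem.Int.mod_lt (ids.length : Int) hkpos
        rw [← hrem] at hmul hr1
        rw [← hbase] at hmul
        by_contra hb
        push Not at hb
        nlinarith [show (0:Int) ≤ (ids.length : Int) from by positivity]
      have hmapsz : (PySem.List.pyRange 0 k 1).map
            (fun i => base + if i < rem then 1 else 0) = pvSizes base m rem := by
        have := pvMap_pyRange_sizes base rem m 0
        simpa [hkm] using this
      simp only [partition_equal_size_py, if_neg hlen, if_neg hk, ← hbase, ← hrem]
      rw [← List.foldl_map (f := fun i => base + if i < rem then 1 else 0)
        (g := fun (st : List (List Int) × Int) sz =>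
          (if st.2 + sz > st.2 then
             st.1 ++ [PySem.List.slice ids (some st.2) (some (st.2 + sz))]
           else st.1,
           st.2 + sz))]
      rw [hmapsz]
      rw [pvFoldA ids (pvSizes base m rem) (pvSizes_nonneg hb0 m rem) [] 0 le_rfl]
      simp only [partition_equal_size_py_alt, if_neg h0, if_neg hk]
      rw [hkm, pvLoop_bySizes m hmpos (ids.length + 1) ids [] 0 le_rfl
        (by positivity) (by omega)]
      simp [← hkm, ← hbase, ← hrem]
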